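-- pv_equiv track=rewrite | github.com/dlce-eva/python-nexus | src/nexus/tools/binarise.py | _recode_to_binary
-- ===== SOURCE A (Python) =====
-- def _recode_to_binary(char, keep_zero=False):
--     """
--     Recodes a dictionary to binary data.
--
--     :param char: A dictionary of taxa to state values
--     :type char: dict
--
--     :param keep_zero: A boolean flag denoting whether to
--         treat '0' as a missing state or not. The default
--         (False) is to ignore '0' as a trait absence.
--
--         Setting this to True will treat '0' as a unique
--         state.
--     :type keep_zero: Boolean
--
--     :return: A dictionary of taxa to recoded values.
--     :raises ValueError: if any of the states in the
--         `char` dictionary is not a string (i.e.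
--         integer or None values)
--
--     >>> recode = _recode_to_binary({'Maori': '1', 'Dutch': '2', 'Latin': '1'})
--     >>> recode['Maori']
--     '10'
--     >>> recode['Dutch']
--     '01'
--     >>> recode['Latin']
--     '10'
--     """
--     newdata = {}
--
--     # unwanted states
--     unwanted_states = ['-', '?']
--     if not keep_zero:
--         unwanted_states.append('0')
--
--     if not all(isinstance(v, str) for v in char.values()):
--         raise ValueError('Data must be strings: %r' % char.values())
--
--     # preprocess taxa states and get unique states
--     states = set()
--     for taxon, value in char.items():
--         char[taxon] = [v for v in value.replace(" ", ",").split(",") if v not in unwanted_states]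
--         states.update(char[taxon])
--
--     states = sorted(states)
--     num_states = len(states)
--     for taxon, values in char.items():
--         newdata[taxon] = ['0' for _ in range(num_states)]
--         for value in values:
--             if value not in unwanted_states:  # ignore missing values
--                 newdata[taxon][states.index(value)] = '1'
--         newdata[taxon] = "".join(newdata[taxon])
--         assert len(newdata[taxon]) == num_states
--
--     return newdata
-- ===== SOURCE B (Python) =====
-- def _recode_to_binary(char, keep_zero=False):
--     # B: transposed (column-wise) pass 2 — per-taxon membership set over the sorted
--     # states instead of position lists with .index writes; rows are cached per
--     # distinct filtered-value tuple.  Mutates `char` in place exactly like A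
--     # (values replaced by filtered lists).
--     unwanted_states = {'-', '?'} if keep_zero else {'-', '?', '0'}
--     if not all(isinstance(v, str) for v in char.values()):
--         raise ValueError('Data must be strings: %r' % char.values())
--     for taxon, value in char.items():
--         char[taxon] = [v for v in value.replace(" ", ",").split(",")
--                        if v not in unwanted_states]
--     states = sorted({s for values in char.values() for s in values})
--     rows = {}
--     newdata = {}
--     for taxon, values in char.items():
--         key = tuple(values)
--         row = rows.get(key)
--         if row is None:
--             present = set(values)
--             row = ''.join(['1' if s in present else '0' for s in states])
--             rows[key] = row
--         newdata[taxon] = row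
--     return newdata
-- ===== Notes on version B (the rewrite author's own statement) =====
-- stated objective: faster
-- what changed: Pass 2 is transposed: instead of allocating a '0' position list and writing '1' at states.index(value) for each value, B builds a per-taxon membership set, emits the binary string column-by-column over the sorted states, and caches the row per distinct filtered-value tuple so duplicate state sets are encoded once.
import Mathlib
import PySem

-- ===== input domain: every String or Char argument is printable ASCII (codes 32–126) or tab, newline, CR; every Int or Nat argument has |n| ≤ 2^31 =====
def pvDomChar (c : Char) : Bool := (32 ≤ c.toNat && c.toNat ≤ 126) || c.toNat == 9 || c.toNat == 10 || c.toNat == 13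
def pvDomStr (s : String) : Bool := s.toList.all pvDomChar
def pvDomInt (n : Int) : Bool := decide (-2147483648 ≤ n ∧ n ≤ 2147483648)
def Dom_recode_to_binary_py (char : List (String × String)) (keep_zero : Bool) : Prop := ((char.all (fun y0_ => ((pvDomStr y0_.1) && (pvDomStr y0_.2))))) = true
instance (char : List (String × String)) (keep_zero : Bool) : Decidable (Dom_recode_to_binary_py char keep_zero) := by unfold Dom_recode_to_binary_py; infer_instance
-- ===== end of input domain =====

-- B replaces A's value-driven position writes (`states.index` + set-by-index into a '0' row)
-- by a column-wise pass over the sorted states with a per-taxon membership set, caching the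
-- row per distinct filtered-value tuple (objective: faster, measured).
-- NOTE: both Pythons mutate `char` in place identically (values become filtered lists);
-- the equivalence proved here is about the RETURN value.

-- ===== PORT A =====
-- value.replace(" ", ",").split(",") filtered by the unwanted states;
-- sep is the non-empty literal "," so split? is always `some` and getD's default is dead.
def pvFilt (unwanted : List String) (value : String) : List String :=
  ((PySem.Str.split? (PySem.Str.replace value " " ",") ",").getD []).filter
    (fun v => !(unwanted.contains v))

-- newdata[taxon][states.index(value)] = '1'; the `none` branch is Python's ValueError,
-- unreachable here because every kept value was added to `states`.
def pvSetIdx (states : List String) (acc : List Char) (v : String) : List Char :=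
  match PySem.List.index? states v with
  | some i => acc.set i '1'
  | none => acc

def recode_to_binary_py (char : List (String × String)) (keep_zero : Bool) : List (String × String) :=
  -- unwanted_states = ['-', '?']; if not keep_zero: append '0'
  let unwanted := if !keep_zero then ["-", "?"] ++ ["0"] else ["-", "?"]
  -- the isinstance check can never raise: all values are strings by type
  let d := PySem.Dict.ofList char
  -- pass 1: char[taxon] = filtered list; states.update(...)
  let p := d.items.foldl
    (fun (p : PySem.Dict String (List String) × PySem.Set String) tv =>
      (p.1.insert tv.1 (pvFilt unwanted tv.2), PySem.Set.update p.2 (pvFilt unwanted tv.2)))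
    (PySem.Dict.empty, PySem.Set.empty)
  let states := PySem.List.sorted p.2 (fun x => x) false
  let num_states := states.length
  -- pass 2: row of '0's, set positions states.index(value) to '1', join
  p.1.items.foldl
    (fun newdata tv =>
      let row := (List.range num_states).map (fun _ => '0')
      let row := tv.2.foldl
        (fun acc v => if !(unwanted.contains v) then pvSetIdx states acc v else acc) row
      newdata ++ [(tv.1, String.mk row)]) []

-- ===== PORT B =====
-- ''.join(['1' if s in present else '0' for s in states]) with present = set(values)
def pvRow (states : List String) (vs : List String) : String :=
  String.mk (states.map
    (fun s => if PySem.Set.contains (PySem.Set.ofList vs) s then '1' else '0'))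

-- loop body of B's pass 2: look the filtered tuple up in the cache, else compute the row
def pvStep (states : List String)
    (st : PySem.Dict (List String) String × List (String × String))
    (tv : String × List String) :
    PySem.Dict (List String) String × List (String × String) :=
  match st.1.get? tv.2 with
  | some row => (st.1, st.2 ++ [(tv.1, row)])
  | none => (st.1.insert tv.2 (pvRow states tv.2), st.2 ++ [(tv.1, pvRow states tv.2)])

def recode_to_binary_py_alt (char : List (String × String)) (keep_zero : Bool) : List (String × String) :=
  let unwanted : PySem.Set String :=
    if keep_zero then PySem.Set.ofList ["-", "?"] else PySem.Set.ofList ["-", "?", "0"]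
  -- same filtered-split expression as A (pvFilt); set membership = list membership on a PySem.Set
  let items := (PySem.Dict.ofList char).items.map (fun tv => (tv.1, pvFilt unwanted tv.2))
  let states := PySem.List.sorted
    (PySem.Set.ofList (items.flatMap (fun tv => tv.2))) (fun x => x) false
  -- rows cache: key = the filtered value tuple, row computed column-wise once per key
  let p2 := items.foldl (pvStep states) (PySem.Dict.empty, [])
  p2.2

-- ===== PRECONDITION & SPEC =====
def Spec_recode_to_binary_py (char : List (String × String)) (keep_zero : Bool) (out : List (String × String)) : Prop := out = recode_to_binary_py_alt char keep_zero
instance (char : List (String × String)) (keep_zero : Bool) (out : List (String × String)) : Decidable (Spec_recode_to_binary_py char keep_zero out) := by unfold Spec_recode_to_binary_py; infer_instance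

-- ===== CLAIM (what is proved, stated in full; the proofs are below) =====
def Claim_equal_recode_to_binary_py : Prop := ∀ (char : List (String × String)) (keep_zero : Bool), Dom_recode_to_binary_py char keep_zero → Spec_recode_to_binary_py char keep_zero (recode_to_binary_py char keep_zero)

-- ===== LEMMAS AND PROOFS =====

-- length is preserved by the position-setting fold
theorem pv_len_fold (states : List String) (vs : List String) (init : List Char) :
    (vs.foldl (pvSetIdx states) init).length = init.length := by
  induction vs generalizing init with
  | nil => rfl
  | cons v vs ih =>
    simp only [List.foldl_cons, ih]
    unfold pvSetIdx
    cases PySem.List.index? states v <;> simp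

-- element i of the fold result: '1' exactly when states[i] occurs among vs
theorem pv_row_get (states : List String) (hnd : states.Nodup)
    (vs : List String) (hsub : ∀ v ∈ vs, v ∈ states)
    (init : List Char) (hlen : init.length = states.length)
    (i : Nat) (hi : i < init.length) (hi' : i < (vs.foldl (pvSetIdx states) init).length)
    (hs : i < states.length) :
    (vs.foldl (pvSetIdx states) init)[i] = if states[i] ∈ vs then '1' else init[i] := by
  induction vs generalizing init with
  | nil => simp
  | cons v vs ih =>
    have hv : v ∈ states := hsub v (List.mem_cons_self ..)
    have hsome : (PySem.List.index? states v).isSome :=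
      (PySem.List.index?_isSome_iff states v).mpr hv
    obtain ⟨j, hj⟩ := Option.isSome_iff_exists.mp hsome
    obtain ⟨hjlt, hjv, _⟩ := PySem.List.getElem_of_index?_eq_some hj
    have hset : pvSetIdx states init v = init.set j '1' := by unfold pvSetIdx; rw [hj]
    have hlen' : (pvSetIdx states init v).length = states.length := by
      rw [hset, List.length_set]; exact hlen
    simp only [List.foldl_cons]
    rw [ih (fun w hw => hsub w (List.mem_cons_of_mem _ hw)) _ hlen'
      (by rw [hlen']; exact hs) (by rw [pv_len_fold, hlen']; exact hs)]
    by_cases hmem : states[i] ∈ vs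
    · simp [hmem]
    · have hiff : states[i] = v ↔ i = j := by
        constructor
        · intro h; exact (List.Nodup.getElem_inj_iff hnd).mp (h.trans hjv.symm)
        · intro h; subst h; exact hjv
      by_cases heq : states[i] = v
      · obtain rfl := hiff.mp heq
        simp [hset, heq]
      · have hij : i ≠ j := fun h => heq (hiff.mpr h)
        simp [hmem, heq, hset, hij.symm]

-- the whole row: value-driven writes into a '0' row = column-wise membership map
theorem pv_row (states : List String) (hnd : states.Nodup)
    (vs : List String) (hsub : ∀ v ∈ vs, v ∈ states) :
    vs.foldl (pvSetIdx states) ((List.range states.length).map (fun _ => '0'))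
      = states.map (fun s => if vs.contains s then '1' else '0') := by
  have hlen : ((List.range states.length).map (fun (_ : Nat) => '0')).length = states.length := by
    simp
  apply List.ext_getElem
  · rw [pv_len_fold, hlen, List.length_map]
  · intro i hi hi'
    have hs : i < states.length := by simpa using hi'
    rw [pv_row_get states hnd vs hsub _ hlen i (by rw [hlen]; exact hs) hi hs]
    by_cases h : states[i] ∈ vs
    · simp [h]
    · have hc : vs.contains states[i] = false := by
        simpa [List.contains_iff_mem] using h
      simp [h]

-- the states accumulator: folding set.update over the filtered lists = set of their concatenation
theorem pv_states (u : List String) (l : List (String × String)) (s : PySem.Set String) :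
    l.foldl (fun s tv => PySem.Set.update s (pvFilt u tv.2)) s
      = PySem.Set.update s (l.flatMap (fun tv => pvFilt u tv.2)) := by
  induction l generalizing s with
  | nil => rfl
  | cons tv l ih =>
    simp only [List.foldl_cons, List.flatMap_cons, ih]
    unfold PySem.Set.update
    rw [List.foldl_append]


-- the rows cache is sound: every cached row is the row its key computes
theorem pv_cache (states : List String) (l : List (String × List String))
    (rows : PySem.Dict (List String) String) (acc : List (String × String))
    (hinv : ∀ k r, rows.get? k = some r → r = pvRow states k) :
    (l.foldl (pvStep states) (rows, acc)).2
    = acc ++ l.map (fun tv => (tv.1, pvRow states tv.2)) := by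
  induction l generalizing rows acc with
  | nil => simp
  | cons tv l ih =>
    simp only [List.foldl_cons, List.map_cons]
    cases hget : rows.get? tv.2 with
    | some row =>
      have hstep : pvStep states (rows, acc) tv = (rows, acc ++ [(tv.1, row)]) := by
        unfold pvStep; rw [hget]
      rw [hstep, ih rows (acc ++ [(tv.1, row)]) hinv, hinv tv.2 row hget]
      simp
    | none =>
      have hstep : pvStep states (rows, acc) tv
          = (rows.insert tv.2 (pvRow states tv.2), acc ++ [(tv.1, pvRow states tv.2)]) := by
        unfold pvStep; rw [hget]
      have hinv' : ∀ k r, (rows.insert tv.2 (pvRow states tv.2)).get? k = some r →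
          r = pvRow states k := by
        intro k r h
        rw [PySem.Dict.get?_insert] at h
        split at h
        · next heq => cases h; rw [heq]
        · exact hinv k r h
      rw [hstep, ih _ (acc ++ [(tv.1, pvRow states tv.2)]) hinv']
      simp

-- ===== VERDICT (by name: the statement is the Claim_ definition above) =====
theorem recode_to_binary_py_spec : Claim_equal_recode_to_binary_py := by
  intro char keep_zero _
  unfold Spec_recode_to_binary_py recode_to_binary_py recode_to_binary_py_alt
  -- the two unwanted-state containers hold the same strings
  have hunw : (if !keep_zero then ["-", "?"] ++ ["0"] else ["-", "?"])
      = (if keep_zero then PySem.Set.ofList ["-", "?"] else PySem.Set.ofList ["-", "?", "0"]) := by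
    cases keep_zero <;> rfl
  rw [hunw]
  set u : List String := if keep_zero then PySem.Set.ofList ["-", "?"] else PySem.Set.ofList ["-", "?", "0"] with hu
  set d := PySem.Dict.ofList char with hd
  -- pass 1 (A): split the product fold into its components
  have hsplit : d.items.foldl
      (fun (p : PySem.Dict String (List String) × PySem.Set String) tv =>
        (p.1.insert tv.1 (pvFilt u tv.2), PySem.Set.update p.2 (pvFilt u tv.2)))
      (PySem.Dict.empty, PySem.Set.empty)
      = (d.items.foldl (fun d1 tv => d1.insert tv.1 (pvFilt u tv.2)) PySem.Dict.empty,
         d.items.foldl (fun s tv => PySem.Set.update s (pvFilt u tv.2)) PySem.Set.empty) :=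
    PySem.List.foldl_prod_mk
      (fun d1 tv => d1.insert tv.1 (pvFilt u tv.2))
      (fun s tv => PySem.Set.update s (pvFilt u tv.2))
      d.items PySem.Dict.empty PySem.Set.empty
  simp only [hsplit]
  have hfresh : ∀ tv ∈ d.items,
      PySem.Dict.contains (PySem.Dict.empty : PySem.Dict String (List String)) tv.1 = false :=
    fun _ _ => rfl
  have hnodk : (d.items.map Prod.fst).Nodup := PySem.Dict.nodup_keys_ofList char
  have hitemsA : (d.items.foldl (fun d1 tv => d1.insert tv.1 (pvFilt u tv.2))
        PySem.Dict.empty).items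
      = d.items.map (fun tv => (tv.1, pvFilt u tv.2)) :=
    (PySem.Dict.items_foldl_insert_fresh d.items Prod.fst (fun tv => pvFilt u tv.2)
      PySem.Dict.empty hfresh hnodk).trans (List.nil_append _)
  have hstates : d.items.foldl (fun s tv => PySem.Set.update s (pvFilt u tv.2)) PySem.Set.empty
      = PySem.Set.ofList
          ((d.items.map (fun tv => (tv.1, pvFilt u tv.2))).flatMap (fun tv => tv.2)) := by
    rw [pv_states]
    simp only [List.flatMap_map]
    rfl
  rw [hitemsA, hstates]
  set items := d.items.map (fun tv => (tv.1, pvFilt u tv.2)) with hitems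
  set S := PySem.Set.ofList (items.flatMap (fun tv => tv.2)) with hS
  set states := PySem.List.sorted S (fun x => x) false with hst
  have hnd : states.Nodup :=
    ((PySem.List.sorted_perm S (fun x => x) false).nodup_iff).mpr (PySem.Set.nodup_ofList _)
  -- pass 2: foldl-append = map, and each row agrees
  rw [PySem.List.foldl_append_singleton_eq_map
    (fun tv => (tv.1, String.mk (tv.2.foldl
      (fun acc v => if !(u.contains v) then pvSetIdx states acc v else acc)
      ((List.range states.length).map (fun _ => '0'))))) items []]
  rw [List.nil_append]
  rw [pv_cache states items PySem.Dict.empty []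
    (fun k r h => by rw [PySem.Dict.get?_empty] at h; cases h)]
  rw [List.nil_append]
  apply List.map_congr_left
  intro tv htv
  have hfilt : ∀ v ∈ tv.2, u.contains v = false := by
    obtain ⟨sv, hsv, rfl⟩ := List.mem_map.mp (hitems ▸ htv)
    intro v hv
    have h2 := (List.mem_filter.mp hv).2
    simpa using h2
  have hsub : ∀ v ∈ tv.2, v ∈ states := by
    intro v hv
    rw [hst, PySem.List.mem_sorted, hS, PySem.Set.mem_ofList]
    exact List.mem_flatMap.mpr ⟨tv, htv, hv⟩
  have hdrop : tv.2.foldl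
      (fun acc v => if !(u.contains v) then pvSetIdx states acc v else acc)
      ((List.range states.length).map (fun _ => '0'))
      = tv.2.foldl (pvSetIdx states) ((List.range states.length).map (fun _ => '0')) :=
    PySem.List.foldl_congr_mem _ _ _ _ (fun acc v hv => by rw [hfilt v hv]; simp)
  rw [hdrop, pv_row states hnd tv.2 hsub]
  have hmemb : ∀ s : String, PySem.Set.contains (PySem.Set.ofList tv.2) s = tv.2.contains s := by
    intro s
    rw [Bool.eq_iff_iff]
    simp [PySem.Set.contains, PySem.Set.mem_ofList]
  simp only [pvRow, hmemb]
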